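-- pv_equiv track=rewrite | github.com/HenrikMidtun/WhoToPay | src/main/python/utils/HomebrewUtils.py | children_combination_with_sum_k
-- ===== SOURCE A (Python) =====
-- from itertools import combinations
--
-- def children_combination_with_sum_k(children: {}, sum_k: int, r: int = 3):
--     children_keys = list(children.keys())
--     r_list = []
--     for i in range(1,r+1):
--         combs = combinations(children_keys,i)
--         for comb in combs:
--             temp_list = [children.get(x) for x in comb]
--             if sum(temp_list) == sum_k:
--                 return list(comb) #Because we only need a single combination
--                 r_list.append(list(comb)) #shhh...
--     return(r_list)
-- ===== SOURCE B (Python) =====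
-- from bisect import bisect_left
--
-- def children_combination_with_sum_k(children: {}, sum_k: int, r: int = 3):
--     items = list(children.items())
--     n = len(items)
--     # index of every value -> ascending list of positions
--     positions = {}
--     for j, (_, v) in enumerate(items):
--         positions.setdefault(v, []).append(j)
--
--     def first_at_least(value, start):
--         # smallest position >= start holding `value`, via binary search
--         lst = positions.get(value)
--         if lst is None:
--             return None
--         p = bisect_left(lst, start)
--         return lst[p] if p < len(lst) else None
--
--     def search(slots, start, target, acc):
--         # lexicographically first completion of `acc` with `slots` more
--         # positions >= start whose values sum to `target`
--         if slots == 1: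
--             j = first_at_least(target, start)
--             if j is None:
--                 return None
--             return acc + [items[j][0]]
--         for j in range(start, n):
--             res = search(slots - 1, j + 1, target - items[j][1], acc + [items[j][0]])
--             if res is not None:
--                 return res
--         return None
--
--     for i in range(1, r + 1):
--         res = search(i, 0, sum_k, [])
--         if res is not None:
--             return res
--     return []
-- ===== Notes on version B (the rewrite author's own statement) =====
-- stated objective: alternative
-- what changed: Instead of materialising all i-combinations of keys and summing each (itertools), B backtracks over prefixes of positions and resolves the last slot by a value-to-sorted-positions dict with a binary search for the smallest completing position, removing the innermost scan (O(n^(i-1) log n) vs O(n^i) per size i; for the generator's unbounded r both degenerate, so no speed is claimed).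
import Mathlib
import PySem

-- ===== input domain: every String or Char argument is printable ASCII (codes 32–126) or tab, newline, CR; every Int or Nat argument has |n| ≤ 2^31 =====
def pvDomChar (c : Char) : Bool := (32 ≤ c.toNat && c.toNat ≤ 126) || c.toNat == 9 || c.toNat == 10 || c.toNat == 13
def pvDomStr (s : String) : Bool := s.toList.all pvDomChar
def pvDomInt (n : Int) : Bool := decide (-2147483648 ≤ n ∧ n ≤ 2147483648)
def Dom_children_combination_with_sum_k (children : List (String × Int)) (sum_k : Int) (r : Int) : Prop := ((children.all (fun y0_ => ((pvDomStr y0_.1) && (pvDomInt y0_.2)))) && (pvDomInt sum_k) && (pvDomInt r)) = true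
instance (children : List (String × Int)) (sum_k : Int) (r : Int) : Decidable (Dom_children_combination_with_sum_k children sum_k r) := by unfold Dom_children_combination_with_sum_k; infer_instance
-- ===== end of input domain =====

-- B replaces A's exhaustive itertools-combinations scan by prefix backtracking over positions
-- plus a value→sorted-positions dict with binary search for the last slot (objective: alternative).


-- ===== PORT A =====
-- itertools.combinations(l, n): all n-element subsequences, in Python's order.
def pyCombs {α : Type} : Nat → List α → List (List α)
  | 0, _ => [[]]
  | _+1, [] => []
  | n+1, x :: xs => ((pyCombs n xs).map (fun c => x :: c)) ++ pyCombs (n+1) xs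

-- A: for i in 1..r, for comb in combinations(keys, i): first comb with sum(children.get(x)) == sum_k,
-- returned as list(comb); else [].  (children.get(x) is ported as getD _ 0: x is drawn from the
-- dict's own keys, so the default is never consulted.)
def children_combination_with_sum_k (children : List (String × Int)) (sum_k : Int) (r : Int) : List String :=
  let d : PySem.Dict String Int := PySem.Dict.mk children
  let children_keys := d.keys
  ((PySem.List.pyRange 1 (r+1) 1).findSome? (fun i =>
      (pyCombs i.toNat children_keys).find? (fun comb =>
        ((comb.map (fun x => d.getD x 0)).sum == sum_k)))).getD []

-- ===== PORT B =====
-- positions: value -> ascending list of positions in `children` (built from one enumerate pass).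
def bPositions (children : List (String × Int)) : PySem.Dict Int (List Int) :=
  ((PySem.List.enumerate children 0).map (fun p => (p.2.2, p.1))).foldl
    (fun d q => d.modify q.1 [] (fun l => l ++ [q.2])) PySem.Dict.empty

-- first_at_least: smallest recorded position >= start holding `value` (bisect_left).
def bFirstAtLeast (pos : PySem.Dict Int (List Int)) (value start : Int) : Option Int :=
  match pos.get? value with
  | none => none
  | some lst => lst[PySem.List.bisectLeft lst start]?

-- search(slots, start, target, acc); Python's `slots` is the Nat argument + 1 (slots >= 1 always).
def bSearch (items : List (String × Int)) (pos : PySem.Dict Int (List Int)) :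
    Nat → Nat → Int → List String → Option (List String)
  | 0, start, target, acc =>
      (bFirstAtLeast pos target start).bind (fun j =>
        (PySem.List.pyGet? items j).map (fun p => acc ++ [p.1]))
  | s+1, start, target, acc =>
      (List.range' start (items.length - start)).findSome? (fun j =>
        bSearch items pos s (j+1) (target - (items.getD j ("", 0)).2) (acc ++ [(items.getD j ("", 0)).1]))

def children_combination_with_sum_k_alt (children : List (String × Int)) (sum_k : Int) (r : Int) : List String :=
  let pos := bPositions children
  ((PySem.List.pyRange 1 (r+1) 1).findSome? (fun i =>
      bSearch children pos (i.toNat - 1) 0 sum_k [])).getD []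

-- ===== PRECONDITION & SPEC =====
-- Pre_ excludes association lists with repeated keys: a Python dict cannot hold them, so such
-- lists do not correspond to any input A was ever run on (A's children.get is keyed lookup).
def Pre_children_combination_with_sum_k (children : List (String × Int)) (sum_k : Int) (r : Int) : Prop :=
  (children.map Prod.fst).Nodup
instance (children : List (String × Int)) (sum_k : Int) (r : Int) : Decidable (Pre_children_combination_with_sum_k children sum_k r) := by unfold Pre_children_combination_with_sum_k; infer_instance

def pvWitness_children_combination_with_sum_k : (List (String × Int)) × Int × Int :=
  ([("a", 1), ("b", 2)], 3, 3)

def Spec_children_combination_with_sum_k (children : List (String × Int)) (sum_k : Int) (r : Int) (out : List String) : Prop := out = children_combination_with_sum_k_alt children sum_k r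
instance (children : List (String × Int)) (sum_k : Int) (r : Int) (out : List String) : Decidable (Spec_children_combination_with_sum_k children sum_k r out) := by unfold Spec_children_combination_with_sum_k; infer_instance

-- ===== CLAIM (what is proved, stated in full; the proofs are below) =====
def Claim_equal_children_combination_with_sum_k : Prop := ∀ (children : List (String × Int)) (sum_k : Int) (r : Int), Dom_children_combination_with_sum_k children sum_k r → Pre_children_combination_with_sum_k children sum_k r → Spec_children_combination_with_sum_k children sum_k r (children_combination_with_sum_k children sum_k r)

-- ===== LEMMAS AND PROOFS =====

theorem pvWitness_ok :
    Dom_children_combination_with_sum_k pvWitness_children_combination_with_sum_k.1 pvWitness_children_combination_with_sum_k.2.1 pvWitness_children_combination_with_sum_k.2.2 ∧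
    Pre_children_combination_with_sum_k pvWitness_children_combination_with_sum_k.1 pvWitness_children_combination_with_sum_k.2.1 pvWitness_children_combination_with_sum_k.2.2 := by
  constructor <;> decide

-- first-match loops compare pointwise on members
theorem find?_congr_mem {α : Type} {p q : α → Bool} {l : List α}
    (h : ∀ x ∈ l, p x = q x) : l.find? p = l.find? q := by
  induction l with
  | nil => rfl
  | cons x xs ih =>
    simp only [List.find?_cons, h x (by simp)]
    cases q x <;> simp [ih (fun y hy => h y (by simp [hy]))]

theorem findSome?_congr_mem {α β : Type} {f g : α → Option β} {l : List α}
    (h : ∀ x ∈ l, f x = g x) : l.findSome? f = l.findSome? g := by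
  induction l with
  | nil => rfl
  | cons x xs ih =>
    rw [List.findSome?_cons, List.findSome?_cons, h x (by simp)]
    cases g x <;> simp [ih (fun y hy => h y (by simp [hy]))]

theorem pyCombs_map {α β : Type} (f : α → β) : ∀ (n : Nat) (l : List α),
    pyCombs n (l.map f) = (pyCombs n l).map (List.map f) := by
  intro n
  induction n with
  | zero => intro l; simp [pyCombs]
  | succ n ih =>
    intro l
    induction l with
    | nil => simp [pyCombs]
    | cons x xs ihl =>
      simp only [List.map_cons, pyCombs, ih xs, ihl, List.map_append, List.map_map]
      rfl

theorem mem_of_mem_pyCombs {α : Type} : ∀ {n : Nat} {l : List α} {c : List α},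
    c ∈ pyCombs n l → ∀ x ∈ c, x ∈ l := by
  intro n
  induction n with
  | zero => intro l c hc; simp [pyCombs] at hc; simp [hc]
  | succ n ih =>
    intro l
    induction l with
    | nil => intro c hc; simp [pyCombs] at hc
    | cons y ys ihl =>
      intro c hc x hx
      simp only [pyCombs, List.mem_append, List.mem_map] at hc
      rcases hc with ⟨c', hc', rfl⟩ | hc
      · rcases List.mem_cons.1 hx with rfl | hx
        · simp
        · exact List.mem_cons_of_mem _ (ih hc' x hx)
      · exact List.mem_cons_of_mem _ (ihl hc x hx)

theorem pyCombs_one {α : Type} (l : List α) : pyCombs 1 l = l.map (fun a => [a]) := by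
  induction l with
  | nil => rfl
  | cons x xs ih => simp [pyCombs, ih]

-- characterisation of the positions dict
theorem bPositions_getD (children : List (String × Int)) (t : Int) :
    (bPositions children).getD t [] =
      ((PySem.List.enumerate children 0).filter (fun p => p.2.2 == t)).map (·.1) := by
  unfold bPositions
  rw [PySem.Dict.getD_foldl_modify_append]
  simp only [List.filter_map, List.map_map, PySem.Dict.getD_empty, List.nil_append]
  rfl

theorem bPositions_sorted (children : List (String × Int)) (t : Int) :
    ((bPositions children).getD t []).Pairwise (· < ·) := by
  rw [bPositions_getD]
  have hsub : (((PySem.List.enumerate children 0).filter (fun p => p.2.2 == t)).map (·.1)).Sublist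
      ((PySem.List.enumerate children 0).map (·.1)) :=
    List.Sublist.map _ List.filter_sublist
  apply List.Pairwise.sublist hsub
  rw [PySem.List.map_fst_enumerate]
  exact PySem.List.pairwise_lt_pyRange_one 0 (0 + children.length)

-- binary search on a sorted list = first element ≥ start
theorem bisect_find {J : List Int} (h : J.Pairwise (· < ·)) (start : Int) :
    J[PySem.List.bisectLeft J start]? = J.find? (fun j => start ≤ j) := by
  have hle : J.Pairwise (· ≤ ·) := h.imp le_of_lt
  obtain ⟨hb1, hb2, hb3⟩ := PySem.List.bisectLeft_spec J start hle
  set p := PySem.List.bisectLeft J start with hp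
  by_cases hlt : p < J.length
  · rw [List.getElem?_eq_getElem hlt]
    symm
    rw [List.find?_eq_some_iff_getElem]
    refine ⟨by simpa using hb3 p hlt le_rfl, p, hlt, rfl, ?_⟩
    intro j hj
    simpa using not_le.2 (hb2 j (hj.trans hlt) hj)
  · rw [List.getElem?_eq_none (by omega)]
    symm
    rw [List.find?_eq_none]
    intro x hx
    obtain ⟨j, hjl, rfl⟩ := List.mem_iff_getElem.1 hx
    simpa using not_le.2 (hb2 j hjl (by omega))

theorem mem_posList {α : Type} {q : Int × α → Bool} {xs : List α} {s j : Int}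
    (h : j ∈ ((PySem.List.enumerate xs s).filter q).map (·.1)) : s ≤ j := by
  have : j ∈ (PySem.List.enumerate xs s).map (·.1) :=
    (List.Sublist.map _ List.filter_sublist).mem h
  rw [PySem.List.map_fst_enumerate] at this
  exact (PySem.List.mem_pyRange_one.1 this).1

theorem shift_bind {α : Type} (x : α) (xs : List α) (e : Int) (J : List Int) (pr : Int → Bool)
    (h : ∀ j ∈ J, e + 1 ≤ j) :
    (J.find? pr).bind (fun j => PySem.List.pyGet? (x :: xs) (j - e)) =
      (J.find? pr).bind (fun j => PySem.List.pyGet? xs (j - (e + 1))) := by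
  cases hf : J.find? pr with
  | none => rfl
  | some j =>
    have hj : e + 1 ≤ j := h j (List.mem_of_find?_eq_some hf)
    simp only [Option.bind_some]
    rw [show j - e = (((j - (e+1)).toNat + 1 : Nat) : Int) by push_cast; omega,
        show j - (e+1) = (((j - (e+1)).toNat : Nat) : Int) by omega,
        PySem.List.pyGet?_natCast, PySem.List.pyGet?_natCast]
    rw [List.getElem?_cons_succ, Int.toNat_natCast]

-- the positions-dict lookup followed by items[j] equals the linear scan of the suffix
theorem enum_find (t : Int) : ∀ (items : List (String × Int)) (e : Int) (start : Nat),
    ((((PySem.List.enumerate items e).filter (fun p => p.2.2 == t)).map (·.1)).find?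
        (fun j => e + (start : Int) ≤ j)).bind (fun j => PySem.List.pyGet? items (j - e)) =
      ((items.drop start).find? (fun p => p.2 == t)) := by
  intro items
  induction items with
  | nil => intro e start; simp [PySem.List.enumerate]
  | cons x xs ih =>
    intro e start
    rw [PySem.List.enumerate_cons]
    have hshift : ∀ (pr : Int → Bool),
        ((((PySem.List.enumerate xs (e+1)).filter (fun p => p.2.2 == t)).map (·.1)).find? pr).bind
            (fun j => PySem.List.pyGet? (x :: xs) (j - e)) =
          ((((PySem.List.enumerate xs (e+1)).filter (fun p => p.2.2 == t)).map (·.1)).find? pr).bind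
            (fun j => PySem.List.pyGet? xs (j - (e+1))) := fun pr =>
      shift_bind x xs e _ pr (fun j hj => mem_posList hj)
    have hcongr : ∀ (s' : Nat), (s' : Int) + 1 = (start : Int) →
        (((PySem.List.enumerate xs (e+1)).filter (fun p => p.2.2 == t)).map (·.1)).find?
            (fun j => decide (e + (start : Int) ≤ j)) =
          (((PySem.List.enumerate xs (e+1)).filter (fun p => p.2.2 == t)).map (·.1)).find?
            (fun j => decide ((e + 1) + (s' : Int) ≤ j)) := by
      intro s' hs'
      apply find?_congr_mem; intro j _
      simp only [decide_eq_decide]; omega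
    by_cases hx : (x.2 == t : Bool) = true
    · simp only [List.filter_cons, hx, if_pos, List.map_cons]
      cases start with
      | zero =>
        rw [List.find?_cons]
        simp only [Nat.cast_zero, add_zero, le_refl, decide_true, Option.bind_some, sub_self]
        rw [show (0:Int) = ((0:Nat):Int) by simp, PySem.List.pyGet?_natCast]
        simp [hx]
      | succ s =>
        rw [List.find?_cons]
        have hpred : (decide (e + ((s+1:Nat):Int) ≤ e)) = false := by
          simp only [decide_eq_false_iff_not]; push_cast; omega
        rw [hpred]
        simp only []
        rw [hcongr s (by push_cast; ring), hshift, ih (e+1) s, List.drop_succ_cons]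
    · have hxf : (x.2 == t : Bool) = false := by simpa using hx
      simp only [List.filter_cons, hxf, Bool.false_eq_true, if_false]
      cases start with
      | zero =>
        have : (((PySem.List.enumerate xs (e+1)).filter (fun p => p.2.2 == t)).map (·.1)).find?
            (fun j => decide (e + ((0:Nat):Int) ≤ j)) =
          (((PySem.List.enumerate xs (e+1)).filter (fun p => p.2.2 == t)).map (·.1)).find?
            (fun j => decide ((e + 1) + ((0:Nat):Int) ≤ j)) := by
          apply find?_congr_mem; intro j hj
          have := mem_posList hj
          simp only [Nat.cast_zero, add_zero, decide_eq_decide]; omega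
        rw [this, hshift, ih (e+1) 0]
        simp [hxf]
      | succ s =>
        rw [hcongr s (by push_cast; ring), hshift, ih (e+1) s, List.drop_succ_cons]

theorem bFirstAtLeast_eq (pos : PySem.Dict Int (List Int)) (v s : Int) :
    bFirstAtLeast pos v s = (pos.getD v [])[PySem.List.bisectLeft (pos.getD v []) s]? := by
  unfold bFirstAtLeast
  cases hg : pos.get? v with
  | none => rw [PySem.Dict.getD_of_get?_eq_none _ _ hg]; simp
  | some lst => rw [PySem.Dict.getD_eq_get?_getD, hg]; rfl

theorem beq_shift (a s t : Int) : ((a + s == t) = (s == t - a)) := by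
  simp only [beq_eq_decide, decide_eq_decide]
  omega

-- the slots = 1 base case: dict + bisect = linear scan of the suffix
theorem bSearch_zero (items : List (String × Int)) (start : Nat) (t : Int) (acc : List String) :
    bSearch items (bPositions items) 0 start t acc =
      ((pyCombs 1 (items.drop start)).find? (fun c => ((c.map Prod.snd).sum == t))).map
        (fun c => acc ++ c.map Prod.fst) := by
  rw [pyCombs_one, List.find?_map]
  show (bFirstAtLeast (bPositions items) t (start : Int)).bind
      (fun j => (PySem.List.pyGet? items j).map (fun p => acc ++ [p.1])) = _
  rw [bFirstAtLeast_eq, bisect_find (bPositions_sorted items t), bPositions_getD]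
  have hefind := enum_find t items 0 start
  simp only [zero_add, sub_zero] at hefind
  have hbind : (((((PySem.List.enumerate items 0).filter (fun p => p.2.2 == t)).map (·.1)).find?
      (fun j => decide ((start : Int) ≤ j))).bind
        (fun j => (PySem.List.pyGet? items j).map (fun p => acc ++ [p.1]))) =
      ((((((PySem.List.enumerate items 0).filter (fun p => p.2.2 == t)).map (·.1)).find?
      (fun j => decide ((start : Int) ≤ j))).bind
        (fun j => PySem.List.pyGet? items j)).map (fun p => acc ++ [p.1])) := by
    cases (((PySem.List.enumerate items 0).filter (fun p => p.2.2 == t)).map (·.1)).find?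
      (fun j => decide ((start : Int) ≤ j)) <;> rfl
  rw [hbind, hefind]
  have : (items.drop start).find? (fun p => p.2 == t) =
      (items.drop start).find? ((fun c => ((c.map Prod.snd).sum == t)) ∘ (fun a => [a])) := by
    apply find?_congr_mem; intro p _; simp
  rw [this]
  cases (items.drop start).find? ((fun c => ((c.map Prod.snd).sum == t)) ∘ (fun a => [a])) <;> rfl

-- the main per-size lemma: bSearch = first combination of the suffix with the right sum
theorem bSearch_eq (items : List (String × Int)) :
    ∀ (s : Nat) (start : Nat) (t : Int) (acc : List String), start ≤ items.length →
    bSearch items (bPositions items) s start t acc =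
      ((pyCombs (s+1) (items.drop start)).find? (fun c => ((c.map Prod.snd).sum == t))).map
        (fun c => acc ++ c.map Prod.fst) := by
  intro s
  induction s with
  | zero => intro start t acc _; exact bSearch_zero items start t acc
  | succ s ih =>
    suffices h : ∀ (m start : Nat), items.length - start = m → start ≤ items.length →
        ∀ (t : Int) (acc : List String),
        bSearch items (bPositions items) (s+1) start t acc =
          ((pyCombs (s+1+1) (items.drop start)).find? (fun c => ((c.map Prod.snd).sum == t))).map
            (fun c => acc ++ c.map Prod.fst) by
      intro start t acc hst; exact h _ start rfl hst t acc
    intro m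
    induction m with
    | zero =>
      intro start hm hle t acc
      have hdrop : items.drop start = [] := by
        have : items.length ≤ start := by omega
        simp [List.drop_eq_nil_iff, this]
      show (List.range' start (items.length - start)).findSome? _ = _
      rw [hm, hdrop]
      simp [pyCombs]
    | succ m ihm =>
      intro start hm hle t acc
      have hlt : start < items.length := by omega
      have hdrop : items.drop start = items[start] :: items.drop (start+1) :=
        List.drop_eq_getElem_cons hlt
      have hgetD : items.getD start ("", 0) = items[start] := List.getD_eq_getElem _ _ hlt
      show (List.range' start (items.length - start)).findSome? _ = _
      rw [hm, List.range'_succ, List.findSome?_cons, hdrop]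
      have hrest : (List.range' (start+1) m).findSome? (fun j =>
          bSearch items (bPositions items) s (j+1) (t - (items.getD j ("", 0)).2)
            (acc ++ [(items.getD j ("", 0)).1])) =
          bSearch items (bPositions items) (s+1) (start+1) t acc := by
        show _ = (List.range' (start+1) (items.length - (start+1))).findSome? _
        rw [show items.length - (start+1) = m by omega]
      rw [hgetD,
        ih (start+1) (t - items[start].2) (acc ++ [items[start].1]) (by omega),
        hrest, ihm (start+1) (by omega) (by omega) t acc]
      rw [show pyCombs (s+1+1) (items[start] :: items.drop (start+1)) =
          ((pyCombs (s+1) (items.drop (start+1))).map (fun c => items[start] :: c)) ++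
            pyCombs (s+1+1) (items.drop (start+1)) from rfl]
      rw [List.find?_append, List.find?_map, Option.map_or]
      have hpred : (pyCombs (s+1) (items.drop (start+1))).find?
          ((fun c => ((c.map Prod.snd).sum == t)) ∘ (fun c => items[start] :: c)) =
          (pyCombs (s+1) (items.drop (start+1))).find?
          (fun c => ((c.map Prod.snd).sum == t - items[start].2)) := by
        apply find?_congr_mem; intro c _
        simp only [Function.comp_apply, List.map_cons, List.sum_cons]
        exact beq_shift _ _ _
      rw [hpred]
      cases (pyCombs (s+1) (items.drop (start+1))).find?
          (fun c => ((c.map Prod.snd).sum == t - items[start].2)) with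
      | none =>
        simp [Option.or]
      | some c =>
        simp [Option.or, List.append_assoc]

-- A's per-size scan, normalised to pair combinations (uses Nodup keys)
theorem a_side (children : List (String × Int)) (h : (children.map Prod.fst).Nodup)
    (sum_k : Int) (n : Nat) :
    (pyCombs n (PySem.Dict.mk children).keys).find? (fun comb =>
        ((comb.map (fun x => (PySem.Dict.mk children).getD x 0)).sum == sum_k)) =
      ((pyCombs n children).find? (fun c => ((c.map Prod.snd).sum == sum_k))).map
        (List.map Prod.fst) := by
  rw [PySem.Dict.keys_mk, pyCombs_map, List.find?_map]
  congr 1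
  apply find?_congr_mem
  intro c hc
  simp only [Function.comp_apply, List.map_map]
  congr 2
  apply List.map_congr_left
  intro p hp
  have hmem : p ∈ children := mem_of_mem_pyCombs hc p hp
  have : (PySem.Dict.mk children).getD p.1 0 = p.2 := by
    apply PySem.Dict.getD_of_mem_items (d := PySem.Dict.mk children) (k := p.1) (v := p.2) hmem
    rw [PySem.Dict.keys_mk]; exact h
  simpa using this

-- ===== VERDICT (by name: the statement is the Claim_ definition above) =====
theorem children_combination_with_sum_k_spec : Claim_equal_children_combination_with_sum_k := by
  intro children sum_k r _ hpre
  unfold Spec_children_combination_with_sum_k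
  unfold children_combination_with_sum_k children_combination_with_sum_k_alt
  simp only
  congr 1
  apply findSome?_congr_mem
  intro i hi
  have h1 : (1:Int) ≤ i := ((PySem.List.mem_pyRange_one).1 hi).1
  have hn : i.toNat = (i.toNat - 1) + 1 := by omega
  rw [a_side children hpre sum_k i.toNat,
      bSearch_eq children (i.toNat - 1) 0 sum_k [] (Nat.zero_le _), ← hn]
  simp
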